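-- pv_equiv track=rewrite | github.com/Samy8769/mail_classifier_3 | mail_classifier/utils.py | has_double_prefix
-- ===== SOURCE A (Python) =====
-- KNOWN_PREFIXES = ('NRB_', 'EQT_', 'EQ_', 'AN_', 'TC_', 'PC_', 'T_', 'S_', 'P_', 'A_', 'C_', 'F_', 'E_', 'Q_', 'J_')
--
-- def has_double_prefix(tag: str) -> bool:
--     """
--     Detect tags with double/compound prefixes like E_TC_DFC.
--     Returns True if the remainder after the first prefix starts with another known prefix.
--     """
--     for prefix in KNOWN_PREFIXES:
--         if tag.startswith(prefix):
--             remainder = tag[len(prefix):]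
--             for inner_prefix in KNOWN_PREFIXES:
--                 if remainder.startswith(inner_prefix):
--                     return True
--             return False
--     return False
-- ===== SOURCE B (Python) =====
-- KNOWN_PREFIXES = ('NRB_', 'EQT_', 'EQ_', 'AN_', 'TC_', 'PC_', 'T_', 'S_', 'P_', 'A_', 'C_', 'F_', 'E_', 'Q_', 'J_')
--
-- # All compound (double) prefixes, built once at import time.
-- COMPOUND_PREFIXES = tuple(p + q for p in KNOWN_PREFIXES for q in KNOWN_PREFIXES)
--
-- def has_double_prefix(tag: str) -> bool:
--     """
--     Detect tags with double/compound prefixes like E_TC_DFC.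
--     A tag has a double prefix iff it starts with some known prefix immediately
--     followed by another known prefix, i.e. with one of the precomputed compounds.
--     (Safe: the known prefixes are mutually prefix-free, so the original's early
--     'return False' on the first matching outer prefix can never hide a match.)
--     """
--     return tag.startswith(COMPOUND_PREFIXES)
-- ===== Notes on version B (the rewrite author's own statement) =====
-- stated objective: idiomatic
-- what changed: Replaced the nested prefix scan with slicing and early returns by a single tag.startswith(tuple) test against the 225 compound prefixes precomputed once at import time; correctness relies on the known prefixes being mutually prefix-free, which is proved in the Lean file.
import Mathlib
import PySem

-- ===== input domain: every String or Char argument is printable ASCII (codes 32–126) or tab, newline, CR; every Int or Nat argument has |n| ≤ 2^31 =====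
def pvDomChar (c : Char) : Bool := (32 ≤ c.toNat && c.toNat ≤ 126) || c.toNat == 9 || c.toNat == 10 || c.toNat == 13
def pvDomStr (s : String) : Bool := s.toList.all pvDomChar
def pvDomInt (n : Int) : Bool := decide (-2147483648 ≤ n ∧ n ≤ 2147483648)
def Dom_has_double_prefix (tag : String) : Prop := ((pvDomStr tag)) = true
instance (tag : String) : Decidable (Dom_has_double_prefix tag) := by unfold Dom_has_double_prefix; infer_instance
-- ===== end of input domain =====

-- B replaces A's nested prefix scan (with slicing and early returns) by one flat
-- startswith test against the precomputed compound prefixes; idiomatic, same cost.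


-- ===== PORT A =====
def pvKnownPrefixes : List String :=
  ["NRB_", "EQT_", "EQ_", "AN_", "TC_", "PC_", "T_", "S_", "P_", "A_", "C_", "F_", "E_", "Q_", "J_"]

-- inner 'for inner_prefix in KNOWN_PREFIXES: if remainder.startswith(...): return True' / fallthrough 'return False'
def pvInnerLoop (remainder : String) : List String → Bool
  | [] => false
  | q :: qs => if PySem.Str.startswith remainder q then true else pvInnerLoop remainder qs

-- outer 'for prefix in KNOWN_PREFIXES: if tag.startswith(prefix): ... return <inner>' / final 'return False'
def pvOuterLoop (tag : String) : List String → Bool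
  | [] => false
  | p :: ps =>
    if PySem.Str.startswith tag p then
      pvInnerLoop (PySem.Str.slice tag (some (PySem.Str.len p)) none) pvKnownPrefixes
    else pvOuterLoop tag ps

def has_double_prefix (tag : String) : Bool := pvOuterLoop tag pvKnownPrefixes

-- ===== PORT B =====
-- COMPOUND_PREFIXES = tuple(p + q for p in KNOWN_PREFIXES for q in KNOWN_PREFIXES)
def pvCompoundPrefixes : List String :=
  pvKnownPrefixes.flatMap (fun p => pvKnownPrefixes.map (fun q => p ++ q))

-- tag.startswith(COMPOUND_PREFIXES): startswith with a tuple = True iff some member matches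
def has_double_prefix_alt (tag : String) : Bool :=
  pvCompoundPrefixes.any (fun c => PySem.Str.startswith tag c)

-- ===== PRECONDITION & SPEC =====
def Spec_has_double_prefix (tag : String) (out : Bool) : Prop := out = has_double_prefix_alt tag
instance (tag : String) (out : Bool) : Decidable (Spec_has_double_prefix tag out) := by unfold Spec_has_double_prefix; infer_instance

-- ===== CLAIM (what is proved, stated in full; the proofs are below) =====
def Claim_equal_has_double_prefix : Prop := ∀ (tag : String), Dom_has_double_prefix tag → Spec_has_double_prefix tag (has_double_prefix tag)

-- ===== LEMMAS AND PROOFS =====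

-- the known prefixes are mutually prefix-free
theorem pvPrefixFree :
    ∀ p ∈ pvKnownPrefixes, ∀ p' ∈ pvKnownPrefixes, p.toList <+: p'.toList → p = p' := by
  decide

-- at most one known prefix can match a given char list
theorem pvUniq {t : List Char} {p p' : String}
    (hp : p ∈ pvKnownPrefixes) (hp' : p' ∈ pvKnownPrefixes)
    (h : p.toList <+: t) (h' : p'.toList <+: t) : p = p' := by
  rcases List.prefix_or_prefix_of_prefix h h' with hpp | hpp
  · exact pvPrefixFree p hp p' hp' hpp
  · exact (pvPrefixFree p' hp' p hp hpp).symm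

theorem pvPrefixAppendDrop {t u v : List Char} (h : u <+: t) :
    (u ++ v <+: t) ↔ (v <+: t.drop u.length) := by
  obtain ⟨r, rfl⟩ := h
  rw [List.drop_left]
  exact List.prefix_append_right_inj u

theorem pvInnerAny (r : String) (L : List String) :
    pvInnerLoop r L = L.any (fun q => PySem.Str.startswith r q) := by
  induction L with
  | nil => rfl
  | cons q qs ih =>
    simp only [pvInnerLoop, List.any_cons, ih]
    cases PySem.Str.startswith r q
    · rw [if_neg (by decide), Bool.false_or]
    · rw [if_pos rfl, Bool.true_or]

theorem pvSwIff (s p : String) :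
    PySem.Str.startswith s p = true ↔ p.toList <+: s.toList := by
  rw [PySem.Str.startswith_eq, PySem.Chars.startswith_iff]

-- A's outer loop with early 'return False' equals an unconditional any, because
-- at most one known prefix matches the tag
theorem pvOuterAny (tag : String) (L : List String) (hL : ∀ p ∈ L, p ∈ pvKnownPrefixes) :
    pvOuterLoop tag L =
      L.any (fun p => PySem.Str.startswith tag p &&
        pvInnerLoop (PySem.Str.slice tag (some (PySem.Str.len p)) none) pvKnownPrefixes) := by
  induction L with
  | nil => rfl
  | cons p ps ih =>
    have hps : ∀ q ∈ ps, q ∈ pvKnownPrefixes := fun q hq => hL q (List.mem_cons_of_mem _ hq)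
    simp only [pvOuterLoop, List.any_cons]
    by_cases h : PySem.Str.startswith tag p
    · rw [if_pos h, h, Bool.true_and]
      rcases hbody : pvInnerLoop (PySem.Str.slice tag (some (PySem.Str.len p)) none) pvKnownPrefixes with _ | _
      · -- body false: every later matching prefix equals p, so its body is also false
        rw [Bool.false_or]
        symm
        rw [List.any_eq_false]
        intro p' hp'
        by_cases h' : PySem.Str.startswith tag p'
        · have : p = p' := pvUniq (hL p (List.mem_cons_self ..)) (hps p' hp')
            ((pvSwIff tag p).mp h) ((pvSwIff tag p').mp h')
          subst this
          simp only [h', Bool.true_and, hbody]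
          exact Bool.false_ne_true
        · simp only [Bool.eq_false_iff.mpr h', Bool.false_and]
          exact Bool.false_ne_true
      · rw [Bool.true_or]
    · rw [if_neg h, Bool.eq_false_iff.mpr h, Bool.false_and, Bool.false_or]
      exact ih hps

theorem pvRemainderToList (tag p : String) :
    (PySem.Str.slice tag (some (PySem.Str.len p)) none).toList = tag.toList.drop p.toList.length := by
  rw [PySem.Str.toList_slice]
  show PySem.List.slice tag.toList (some (PySem.Str.len p)) none = _
  rw [PySem.Str.len, PySem.List.slice_from _ (by positivity)]
  simp

theorem pvMainEq (tag : String) : has_double_prefix tag = has_double_prefix_alt tag := by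
  rw [Bool.eq_iff_iff]
  rw [has_double_prefix, pvOuterAny tag pvKnownPrefixes (fun _ h => h)]
  rw [has_double_prefix_alt]
  simp only [List.any_eq_true, Bool.and_eq_true, pvInnerAny, pvCompoundPrefixes,
    List.mem_flatMap, List.mem_map]
  constructor
  · rintro ⟨p, hp, hsw, q, hq, hswq⟩
    refine ⟨p ++ q, ⟨p, hp, q, hq, rfl⟩, ?_⟩
    rw [pvSwIff, String.toList_append]
    rw [pvSwIff] at hsw hswq
    rw [pvRemainderToList] at hswq
    exact (pvPrefixAppendDrop hsw).mpr hswq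
  · rintro ⟨c, ⟨p, hp, q, hq, rfl⟩, hsw⟩
    rw [pvSwIff, String.toList_append] at hsw
    have hswp : p.toList <+: tag.toList :=
      (List.prefix_append p.toList q.toList).trans hsw
    refine ⟨p, hp, (pvSwIff tag p).mpr hswp, q, hq, ?_⟩
    rw [pvSwIff, pvRemainderToList]
    exact (pvPrefixAppendDrop hswp).mp hsw

-- ===== VERDICT (by name: the statement is the Claim_ definition above) =====
theorem has_double_prefix_spec : Claim_equal_has_double_prefix := by
  intro tag _
  exact pvMainEq tag
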